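-- pv_equiv track=rewrite | github.com/pypi-data/pypi-mirror-382 | packages/timewarp-ide/timewarp_ide-1.0.0.tar.gz/timewarp_ide-1.0.0/plugins/plugins/code_formatter/plugin.py | clean_code_whitespace
-- ===== SOURCE A (Python) =====
-- def clean_code_whitespace(code):
--     """Clean unnecessary whitespace"""
--     # Remove trailing whitespace
--     lines = code.split('\n')
--     cleaned_lines = [line.rstrip() for line in lines]
--
--     # Remove empty lines at the end
--     while cleaned_lines and not cleaned_lines[-1]:
--         cleaned_lines.pop()
--
--     # Normalize multiple consecutive empty lines to single empty line
--     normalized_lines = []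
--     prev_empty = False
--
--     for line in cleaned_lines:
--         if not line.strip():
--             if not prev_empty:
--                 normalized_lines.append('')
--                 prev_empty = True
--         else:
--             normalized_lines.append(line)
--             prev_empty = False
--
--     return '\n'.join(normalized_lines) + '\n' if normalized_lines else ''
-- ===== SOURCE B (Python) =====
-- def clean_code_whitespace(code):
--     """Clean unnecessary whitespace"""
--     # Single character-level scan: buffered trailing whitespace (ws) and pending
--     # newlines (nl) are only flushed when the next visible character arrives, so
--     # per-line trailing whitespace, trailing blank lines and extra blank lines
--     # are all dropped by never being emitted.
--     out = []
--     ws = []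
--     nl = 0
--     for c in code:
--         if c == '\n':
--             nl += 1
--             ws = []
--         elif c.isspace():
--             ws.append(c)
--         else:
--             out.append('\n' * (min(nl, 1) if not out else min(nl, 2)))
--             out.extend(ws)
--             out.append(c)
--             ws = []
--             nl = 0
--     return ''.join(out) + '\n' if out else ''
-- ===== Notes on version B (the rewrite author's own statement) =====
-- stated objective: alternative
-- what changed: Replaces A's four line-level passes (split on newline, per-line rstrip, pop trailing blanks, flag-driven collapse, join) by one character-level state machine over the raw string that buffers pending whitespace and pending newlines and only flushes them when the next visible character arrives, so trailing whitespace, trailing blank lines and extra blank lines are simply never emitted.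
import Mathlib
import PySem

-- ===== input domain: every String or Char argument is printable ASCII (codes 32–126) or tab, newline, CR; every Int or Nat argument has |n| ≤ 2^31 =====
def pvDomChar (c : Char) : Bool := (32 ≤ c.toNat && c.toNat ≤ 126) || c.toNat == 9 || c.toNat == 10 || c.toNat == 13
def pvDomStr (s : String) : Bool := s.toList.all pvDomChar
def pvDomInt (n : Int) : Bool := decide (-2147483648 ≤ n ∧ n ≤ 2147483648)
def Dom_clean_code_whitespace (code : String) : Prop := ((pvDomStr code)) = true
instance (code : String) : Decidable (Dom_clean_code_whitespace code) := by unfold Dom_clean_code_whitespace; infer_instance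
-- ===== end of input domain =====

-- B replaces A's four line-level passes (split/rstrip/pop-trailing/flag-collapse/join) by one
-- character-level state machine that buffers pending whitespace and newlines and flushes them
-- only at the next visible character (objective: alternative decomposition, same cost).


-- ===== PORT A =====
-- the 'while cleaned_lines and not cleaned_lines[-1]: cleaned_lines.pop()' loop
def pvPopTrailing (ls : List (List Char)) : List (List Char) :=
  if h : ls ≠ [] then
    if ls.getLast h = [] then pvPopTrailing ls.dropLast else ls
  else ls
termination_by ls.length
decreasing_by
  have : ls.length ≠ 0 := by simpa using h
  simp [List.length_dropLast]; omega

def clean_code_whitespace (code : String) : String :=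
  let lines := PySem.Chars.splitOn code.toList ['\n']
  let cleaned_lines := lines.map PySem.Chars.rstrip
  let cleaned_lines := pvPopTrailing cleaned_lines
  let st := cleaned_lines.foldl
    (fun (acc : List (List Char) × Bool) line =>
      if PySem.Chars.strip line = [] then
        (if acc.2 = false then (acc.1 ++ [([] : List Char)], true) else acc)
      else (acc.1 ++ [line], false))
    ([], false)
  if st.1 ≠ [] then String.mk (PySem.Chars.join ['\n'] st.1 ++ ['\n']) else ""

-- ===== PORT B =====
-- one step of B's character scan; state = (out, pending whitespace ws, pending newlines nl)
def pvStepB (s : List Char × List Char × Nat) (c : Char) : List Char × List Char × Nat :=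
  if c = '\n' then (s.1, [], s.2.2 + 1)
  else if PySem.Chars.isspace c then (s.1, s.2.1 ++ [c], s.2.2)
  else (s.1 ++ List.replicate (if s.1 = [] then min s.2.2 1 else min s.2.2 2) '\n' ++ s.2.1 ++ [c],
        [], 0)

def clean_code_whitespace_alt (code : String) : String :=
  let st := code.toList.foldl pvStepB ([], [], 0)
  if st.1 ≠ [] then String.mk (st.1 ++ ['\n']) else ""

-- ===== PRECONDITION & SPEC =====
def Spec_clean_code_whitespace (code : String) (out : String) : Prop := out = clean_code_whitespace_alt code
instance (code : String) (out : String) : Decidable (Spec_clean_code_whitespace code out) := by unfold Spec_clean_code_whitespace; infer_instance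

-- ===== CLAIM (what is proved, stated in full; the proofs are below) =====
def Claim_equal_clean_code_whitespace : Prop := ∀ (code : String), Dom_clean_code_whitespace code → Spec_clean_code_whitespace code (clean_code_whitespace code)

-- ===== LEMMAS AND PROOFS =====

-- canonical "collapse consecutive blank lines" recursion (A's normalize loop)
def pvCollapse : Bool → List (List Char) → List (List Char)
  | _, [] => []
  | pe, l :: t =>
    if l = [] then (if pe then pvCollapse true t else [] :: pvCollapse true t)
    else l :: pvCollapse false t

-- functional model of PySem.Chars.splitOn s ['\n']
def pvMySplit : List Char → List Char → List (List Char)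
  | [], cur => [cur.reverse]
  | c :: rest, cur => if c = '\n' then cur.reverse :: pvMySplit rest [] else pvMySplit rest (c :: cur)

def pvFlat (M : List (List Char)) : List Char := (M.map (fun m => '\n' :: m)).flatten

def pvJfl : List (List Char) → List Char
  | [] => []
  | x :: xs => x ++ pvFlat xs

-- line-level renderings of B's scan (nl = pending newlines); pvRen0 = before any output,
-- pvRen1 = after some output
def pvRen1 : Nat → List (List Char) → List Char
  | _, [] => []
  | nl, r :: t => if r = [] then pvRen1 (nl + 1) t else List.replicate (min nl 2) '\n' ++ r ++ pvRen1 1 t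

def pvRen0 : Nat → List (List Char) → List Char
  | _, [] => []
  | nl, r :: t => if r = [] then pvRen0 (nl + 1) t else List.replicate (min nl 1) '\n' ++ r ++ pvRen1 1 t

def pvAccR : List Char → Nat → List (List Char) → List Char
  | out, _, [] => out
  | out, nl, r :: t =>
    if r = [] then pvAccR out (nl + 1) t
    else pvAccR (out ++ List.replicate (if out = [] then min nl 1 else min nl 2) '\n' ++ r) 1 t

-- B's char fold grouped by lines
def pvRunB : (List Char × List Char × Nat) → List (List Char) → (List Char × List Char × Nat)
  | s, [] => s
  | s, [l] => List.foldl pvStepB s l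
  | s, l :: l' :: t =>
    pvRunB ((List.foldl pvStepB s l).1, [], (List.foldl pvStepB s l).2.2 + 1) (l' :: t)

def pvTrail (x : List Char) : List Char := (x.reverse.takeWhile PySem.Chars.isspace).reverse

theorem pvStrip_eq_nil_iff (z : List Char) :
    PySem.Chars.strip z = [] ↔ ∀ c ∈ z, PySem.Chars.isspace c := by
  simp only [PySem.Chars.strip, PySem.Chars.rstrip, PySem.Chars.lstrip,
    List.reverse_eq_nil_iff, List.dropWhile_eq_nil_iff]
  constructor
  · intro h c hc
    have h2 : ∀ c ∈ List.dropWhile PySem.Chars.isspace z, PySem.Chars.isspace c :=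
      fun c hc => h c (by simpa using hc)
    have hsplit : c ∈ List.takeWhile PySem.Chars.isspace z
        ++ List.dropWhile PySem.Chars.isspace z := by
      rw [List.takeWhile_append_dropWhile]; exact hc
    rcases List.mem_append.mp hsplit with h1 | h1
    · exact List.mem_takeWhile_imp h1
    · exact h2 c h1
  · intro h x hx
    exact h x ((List.dropWhile_sublist (p := PySem.Chars.isspace) (l := z)).mem (by simpa using hx))

theorem pvRstrip_eq_nil_iff (z : List Char) :
    PySem.Chars.rstrip z = [] ↔ ∀ c ∈ z, PySem.Chars.isspace c := by
  simp only [PySem.Chars.rstrip, List.reverse_eq_nil_iff, List.dropWhile_eq_nil_iff]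
  constructor
  · intro h c hc; exact h c (by simpa using hc)
  · intro h c hc; exact h c (by simpa using hc)

theorem pvStrip_rstrip_eq_nil_iff (x : List Char) :
    PySem.Chars.strip (PySem.Chars.rstrip x) = [] ↔ PySem.Chars.rstrip x = [] := by
  constructor
  · intro h
    have hall := (pvStrip_eq_nil_iff _).mp h
    by_contra hne
    simp only [PySem.Chars.rstrip] at hne hall
    have hd : List.dropWhile PySem.Chars.isspace x.reverse ≠ [] := by
      intro h0; exact hne (by simp [h0])
    have hhead := List.head_dropWhile_not (p := PySem.Chars.isspace) (l := x.reverse) hd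
    have : PySem.Chars.isspace ((List.dropWhile PySem.Chars.isspace x.reverse).head hd) := by
      exact hall _ (by simpa using List.head_mem hd)
    simp [hhead] at this
  · intro h; rw [h]; rfl

-- A's normalize loop is pvCollapse, for lines that are blank iff empty (they are rstripped)
theorem pvFoldA (ls : List (List Char)) (acc : List (List Char)) (pe : Bool)
    (H : ∀ l ∈ ls, (PySem.Chars.strip l = [] ↔ l = [])) :
    (ls.foldl
      (fun (acc : List (List Char) × Bool) line =>
        if PySem.Chars.strip line = [] then
          (if acc.2 = false then (acc.1 ++ [([] : List Char)], true) else acc)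
        else (acc.1 ++ [line], false))
      (acc, pe)).1 = acc ++ pvCollapse pe ls := by
  induction ls generalizing acc pe with
  | nil => simp [pvCollapse]
  | cons l t ih =>
    have hl := H l (by simp)
    have ht : ∀ x ∈ t, (PySem.Chars.strip x = [] ↔ x = []) := fun x hx => H x (by simp [hx])
    by_cases he : l = []
    · subst he
      have hs : PySem.Chars.strip ([] : List Char) = [] := by simp [PySem.Chars.strip,
        PySem.Chars.rstrip, PySem.Chars.lstrip]
      cases pe with
      | true => simp [List.foldl_cons, hs, pvCollapse, ih _ _ ht]
      | false => simp [List.foldl_cons, hs, pvCollapse, ih _ _ ht]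
    · have hs : ¬ PySem.Chars.strip l = [] := fun h => he (hl.mp h)
      simp [List.foldl_cons, hs, pvCollapse, he, ih _ _ ht]

theorem pvCollapse_ne_nil (l : List Char) (t : List (List Char)) :
    pvCollapse false (l :: t) ≠ [] := by
  by_cases he : l = [] <;> simp [pvCollapse, he]

-- rstrip / trailing-whitespace cons equations
theorem pvRstrip_cons_of_ne (c : Char) (t : List Char) (h : PySem.Chars.rstrip t ≠ []) :
    PySem.Chars.rstrip (c :: t) = c :: PySem.Chars.rstrip t := by
  have hd : List.dropWhile PySem.Chars.isspace t.reverse ≠ [] := by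
    intro h0; exact h (by simp [PySem.Chars.rstrip, h0])
  simp [PySem.Chars.rstrip, List.dropWhile_append, hd]

theorem pvTrail_cons_of_ne (c : Char) (t : List Char) (h : PySem.Chars.rstrip t ≠ []) :
    pvTrail (c :: t) = pvTrail t := by
  have hd : List.dropWhile PySem.Chars.isspace t.reverse ≠ [] := by
    intro h0; exact h (by simp [PySem.Chars.rstrip, h0])
  have hlen : (List.takeWhile PySem.Chars.isspace t.reverse).length
      + (List.dropWhile PySem.Chars.isspace t.reverse).length = t.length := by
    have h2 := congrArg List.length
      (List.takeWhile_append_dropWhile (p := PySem.Chars.isspace) (l := t.reverse))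
    rw [List.length_append] at h2; simpa using h2
  have hdpos : 0 < (List.dropWhile PySem.Chars.isspace t.reverse).length :=
    List.length_pos_iff.mpr hd
  have htw : (List.takeWhile PySem.Chars.isspace t.reverse).length ≠ t.length := by omega
  simp [pvTrail, List.takeWhile_append, htw]

theorem pvRstrip_cons_of_nil (c : Char) (t : List Char) (h : PySem.Chars.rstrip t = []) :
    PySem.Chars.rstrip (c :: t) = if PySem.Chars.isspace c then [] else [c] := by
  have hd : List.dropWhile PySem.Chars.isspace t.reverse = [] := by
    simpa [PySem.Chars.rstrip] using h
  by_cases hc : PySem.Chars.isspace c <;>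
    simp [PySem.Chars.rstrip, List.dropWhile_append, hd, List.dropWhile, hc]

theorem pvTrail_cons_of_nil (c : Char) (t : List Char) (h : PySem.Chars.rstrip t = [])
    (hc : PySem.Chars.isspace c = false) : pvTrail (c :: t) = t := by
  have hd : List.dropWhile PySem.Chars.isspace t.reverse = [] := by
    simpa [PySem.Chars.rstrip] using h
  have htw : List.takeWhile PySem.Chars.isspace t.reverse = t.reverse := by
    have h2 := List.takeWhile_append_dropWhile (p := PySem.Chars.isspace) (l := t.reverse)
    rw [hd] at h2; simpa using h2
  simp [pvTrail, List.takeWhile_append, htw, List.takeWhile, hc]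

-- B's fold over one '\n'-free line, in closed form
theorem pvLineFold (ls : List Char) (hnl : '\n' ∉ ls) (out ws : List Char) (nl : Nat) :
    List.foldl pvStepB (out, ws, nl) ls =
      if PySem.Chars.rstrip ls = [] then (out, ws ++ ls, nl)
      else (out ++ List.replicate (if out = [] then min nl 1 else min nl 2) '\n' ++ ws
              ++ PySem.Chars.rstrip ls, pvTrail ls, 0) := by
  induction ls generalizing out ws nl with
  | nil => simp [PySem.Chars.rstrip]
  | cons c t ih =>
    have hc : c ≠ '\n' := by intro h; exact hnl (by simp [h])
    have hnt : '\n' ∉ t := fun h => hnl (by simp [h])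
    by_cases hs : PySem.Chars.isspace c
    · -- whitespace char: buffered
      have hstep : pvStepB (out, ws, nl) c = (out, ws ++ [c], nl) := by
        simp [pvStepB, hc, hs]
      rw [List.foldl_cons, hstep, ih hnt]
      by_cases h0 : PySem.Chars.rstrip t = []
      · have : PySem.Chars.rstrip (c :: t) = [] := by
          rw [pvRstrip_cons_of_nil c t h0]; simp [hs]
        simp [h0, this]
      · have h1 := pvRstrip_cons_of_ne c t h0
        have h2 := pvTrail_cons_of_ne c t h0
        have h3 : PySem.Chars.rstrip (c :: t) ≠ [] := by simp [h1]
        simp [h0, h3, h1, h2]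
    · -- visible char: flush
      have hstep : pvStepB (out, ws, nl) c =
          (out ++ List.replicate (if out = [] then min nl 1 else min nl 2) '\n' ++ ws ++ [c], [], 0) := by
        simp [pvStepB, hc, hs]
      rw [List.foldl_cons, hstep, ih hnt]
      have hone : (out ++ List.replicate (if out = [] then min nl 1 else min nl 2) '\n' ++ ws ++ [c]) ≠ [] := by
        simp
      by_cases h0 : PySem.Chars.rstrip t = []
      · have h1 : PySem.Chars.rstrip (c :: t) = [c] := by
          rw [pvRstrip_cons_of_nil c t h0]; simp [hs]
        have h2 := pvTrail_cons_of_nil c t h0 (by simpa using hs)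
        have h3 : PySem.Chars.rstrip (c :: t) ≠ [] := by simp [h1]
        have htr : pvTrail t = t := by
          have hall := (pvRstrip_eq_nil_iff t).mp h0
          simp only [pvTrail]
          rw [List.takeWhile_eq_self_iff.mpr (by intro x hx; exact hall x (by simpa using hx))]
          simp
        simp [h0, h3, h1, h2, htr]
      · have h1 := pvRstrip_cons_of_ne c t h0
        have h2 := pvTrail_cons_of_ne c t h0
        have h3 : PySem.Chars.rstrip (c :: t) ≠ [] := by simp [h1]
        simp [h0, h3, h1, h2, hone]

-- splitOn bridge





theorem pvMySplit_cons_nl (rest cur : List Char) :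
    pvMySplit ('\n' :: rest) cur = cur.reverse :: pvMySplit rest [] := by
  simp [pvMySplit]

theorem pvMySplit_cons_of_ne (c : Char) (rest cur : List Char) (hc : c ≠ '\n') :
    pvMySplit (c :: rest) cur = pvMySplit rest (c :: cur) := by
  simp [pvMySplit, hc]

theorem pvIntercalate_cons_cons (s a b : List Char) (t : List (List Char)) :
    List.intercalate s (a :: b :: t) = a ++ s ++ List.intercalate s (b :: t) := by
  simp [List.intercalate, List.intersperse]

theorem pvSplitOn_go (fuel : Nat) : ∀ (l cur : List Char) (acc : List (List Char)),
    l.length + 1 ≤ fuel →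
    PySem.Chars.splitOn.go ['\n'] fuel l cur acc = acc.reverse ++ pvMySplit l cur := by
  induction fuel with
  | zero => intro l cur acc h; omega
  | succ n ih =>
    intro l cur acc h
    cases l with
    | nil => simp [PySem.Chars.splitOn.go, pvMySplit]
    | cons c rest =>
      by_cases hc : c = '\n'
      · subst hc
        have hp : List.isPrefixOf ['\n'] ('\n' :: rest) = true := by simp [List.isPrefixOf]
        rw [PySem.Chars.splitOn.go]
        simp only [hp, if_pos, List.length_cons, List.length_nil, List.drop_succ_cons,
          List.drop_zero]
        rw [ih rest [] _ (by simp at h ⊢; omega)]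
        simp [pvMySplit]
      · have hp : List.isPrefixOf ['\n'] (c :: rest) = false := by
          simp [List.isPrefixOf]; exact fun h => absurd h.symm hc
        rw [PySem.Chars.splitOn.go]
        simp only [hp]
        rw [if_neg (by simp), ih rest (c :: cur) acc (by simp at h ⊢; omega)]
        simp [pvMySplit, hc]

theorem pvSplitOn_eq (s : List Char) :
    PySem.Chars.splitOn s ['\n'] = pvMySplit s [] := by
  rw [PySem.Chars.splitOn, pvSplitOn_go (s.length + 1) s [] [] (by omega)]
  simp

theorem pvMySplit_ne_nil (l : List Char) : ∀ cur, pvMySplit l cur ≠ [] := by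
  induction l with
  | nil => intro cur; simp [pvMySplit]
  | cons c rest ih =>
    intro cur
    by_cases hc : c = '\n' <;> simp [pvMySplit, hc, ih]

theorem pvMySplit_intercalate (l : List Char) : ∀ cur,
    List.intercalate ['\n'] (pvMySplit l cur) = cur.reverse ++ l := by
  induction l with
  | nil => intro cur; simp [pvMySplit, List.intercalate]
  | cons c rest ih =>
    intro cur
    by_cases hc : c = '\n'
    · subst hc
      obtain ⟨x, xs, hx⟩ := List.exists_cons_of_ne_nil (pvMySplit_ne_nil rest [])
      rw [pvMySplit_cons_nl, show pvMySplit rest [] = x :: xs from hx, pvIntercalate_cons_cons,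
        show x :: xs = pvMySplit rest [] from hx.symm, ih]
      simp
    · simp only [pvMySplit, if_neg hc]
      rw [ih]
      simp

theorem pvMySplit_no_nl (l : List Char) : ∀ cur, '\n' ∉ cur →
    ∀ p ∈ pvMySplit l cur, '\n' ∉ p := by
  induction l with
  | nil => intro cur hcur p hp; simp [pvMySplit] at hp; subst hp; simpa using hcur
  | cons c rest ih =>
    intro cur hcur p hp
    by_cases hc : c = '\n'
    · subst hc
      rw [pvMySplit_cons_nl] at hp
      simp only [List.mem_cons] at hp
      rcases hp with rfl | hp
      · simpa using hcur
      · exact ih [] (by simp) p hp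
    · rw [pvMySplit_cons_of_ne c rest cur hc] at hp
      exact ih (c :: cur) (by simp [hcur]; exact fun h => absurd h.symm hc) p hp

-- B's char fold over the whole text = pvRunB over the lines
theorem pvFoldB_runB (ts : List (List Char)) : ∀ (l : List Char) (s : List Char × List Char × Nat),
    List.foldl pvStepB s (List.intercalate ['\n'] (l :: ts)) = pvRunB s (l :: ts) := by
  induction ts with
  | nil => intro l s; simp [List.intercalate, pvRunB]
  | cons l' t ih =>
    intro l s
    rw [pvIntercalate_cons_cons, List.append_assoc, List.foldl_append, pvRunB]
    rw [show ['\n'] ++ List.intercalate ['\n'] (l' :: t) = '\n' :: List.intercalate ['\n'] (l' :: t) from rfl]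
    rw [List.foldl_cons]
    have hstep : pvStepB (List.foldl pvStepB s l) '\n'
        = ((List.foldl pvStepB s l).1, [], (List.foldl pvStepB s l).2.2 + 1) := by
      simp [pvStepB]
    rw [hstep, ih]

-- pvRunB in terms of the rstripped lines
theorem pvRunB_accR (L : List (List Char)) (hL : ∀ l ∈ L, '\n' ∉ l) :
    ∀ (out : List Char) (nl : Nat),
    (pvRunB (out, [], nl) L).1 = pvAccR out nl (L.map PySem.Chars.rstrip) := by
  induction L with
  | nil => intro out nl; simp [pvRunB, pvAccR]
  | cons l t ih =>
    intro out nl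
    have hl : '\n' ∉ l := hL l (by simp)
    have ht : ∀ x ∈ t, '\n' ∉ x := fun x hx => hL x (by simp [hx])
    cases t with
    | nil =>
      rw [show pvRunB (out, [], nl) [l] = List.foldl pvStepB (out, [], nl) l from rfl]
      rw [pvLineFold l hl out [] nl]
      by_cases h0 : PySem.Chars.rstrip l = []
      · rw [if_pos h0]; simp [pvAccR, h0]
      · rw [if_neg h0]; simp [pvAccR, h0]
    | cons l' t' =>
      rw [show pvRunB (out, [], nl) (l :: l' :: t')
          = pvRunB ((List.foldl pvStepB (out, [], nl) l).1, [],
              (List.foldl pvStepB (out, [], nl) l).2.2 + 1) (l' :: t') from rfl]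
      rw [pvLineFold l hl out [] nl]
      by_cases h0 : PySem.Chars.rstrip l = []
      · rw [if_pos h0]
        have := ih ht out (nl + 1)
        simp only at this ⊢
        rw [this]
        simp [pvAccR, h0]
      · rw [if_neg h0]
        have := ih ht (out ++ List.replicate (if out = [] then min nl 1 else min nl 2) '\n'
          ++ [] ++ PySem.Chars.rstrip l) 1
        simp only at this ⊢
        rw [this]
        simp [pvAccR, h0]

theorem pvAccR_ren1 (R : List (List Char)) : ∀ (out : List Char) (nl : Nat), out ≠ [] →
    pvAccR out nl R = out ++ pvRen1 nl R := by
  induction R with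
  | nil => intro out nl h; simp [pvAccR, pvRen1]
  | cons r t ih =>
    intro out nl h
    by_cases h0 : r = []
    · subst h0; simp only [pvAccR, if_pos rfl, pvRen1]; exact ih out (nl+1) h
    · simp only [pvAccR, if_neg h0, pvRen1]
      rw [ih _ 1 (by simp [h0]), if_neg h]
      simp

theorem pvAccR_ren0 (R : List (List Char)) : ∀ (nl : Nat),
    pvAccR [] nl R = pvRen0 nl R := by
  induction R with
  | nil => intro nl; simp [pvAccR, pvRen0]
  | cons r t ih =>
    intro nl
    by_cases h0 : r = []
    · subst h0; simp only [pvAccR, if_pos rfl, pvRen0]; exact ih (nl+1)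
    · simp only [pvAccR, if_neg h0, pvRen0]
      rw [pvAccR_ren1 t _ 1 (by simp [h0])]
      simp

theorem pvPopTrailing_nil : pvPopTrailing [] = [] := by
  rw [pvPopTrailing]; simp

theorem pvPopTrailing_blank (ys : List (List Char)) :
    pvPopTrailing (ys ++ [[]]) = pvPopTrailing ys := by
  rw [pvPopTrailing]
  simp

theorem pvPopTrailing_last_ne (ys : List (List Char)) (y : List Char) (hy : y ≠ []) :
    pvPopTrailing (ys ++ [y]) = ys ++ [y] := by
  rw [pvPopTrailing]
  simp [hy]

-- renders ignore a trailing blank line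
theorem pvRen1_append_blank (t : List (List Char)) : ∀ nl, pvRen1 nl (t ++ [[]]) = pvRen1 nl t := by
  induction t with
  | nil => intro nl; simp [pvRen1]
  | cons r u ih =>
    intro nl
    by_cases h0 : r = [] <;> simp [pvRen1, h0, ih]

theorem pvRen0_append_blank (t : List (List Char)) : ∀ nl, pvRen0 nl (t ++ [[]]) = pvRen0 nl t := by
  induction t with
  | nil => intro nl; simp [pvRen0, pvRen1]
  | cons r u ih =>
    intro nl
    by_cases h0 : r = [] <;> simp [pvRen0, h0, ih, pvRen1_append_blank]

theorem pvRen0_popTrailing (R : List (List Char)) :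
    pvRen0 0 (pvPopTrailing R) = pvRen0 0 R := by
  induction R using List.reverseRecOn with
  | nil => rw [pvPopTrailing_nil]
  | append_singleton ys y ih =>
    by_cases hy : y = []
    · subst hy
      rw [pvPopTrailing_blank, ih, pvRen0_append_blank]
    · rw [pvPopTrailing_last_ne ys y hy]

theorem pvPopTrailing_subset (R : List (List Char)) : ∀ l ∈ pvPopTrailing R, l ∈ R := by
  induction R using List.reverseRecOn with
  | nil => rw [pvPopTrailing_nil]; simp
  | append_singleton ys y ih =>
    by_cases hy : y = []
    · subst hy
      rw [pvPopTrailing_blank]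
      intro l hl; exact List.mem_append_left _ (ih l hl)
    · rw [pvPopTrailing_last_ne ys y hy]
      simp

theorem pvPopTrailing_getLast (R : List (List Char)) :
    ∀ h : pvPopTrailing R ≠ [], (pvPopTrailing R).getLast h ≠ [] := by
  induction R using List.reverseRecOn with
  | nil => rw [pvPopTrailing_nil]; simp
  | append_singleton ys y ih =>
    by_cases hy : y = []
    · subst hy
      rw [pvPopTrailing_blank]
      exact ih
    · rw [pvPopTrailing_last_ne ys y hy]
      intro h
      simpa using hy

-- the render of a trailing-blank-free list is A's collapse, joined
theorem pvRen1_collapse (t : List (List Char)) (ht : ∀ h : t ≠ [], t.getLast h ≠ []) :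
    (t ≠ [] → ∀ nl, 2 ≤ nl → pvRen1 nl t = '\n' :: pvFlat (pvCollapse true t)) ∧
    pvRen1 1 t = pvFlat (pvCollapse false t) := by
  induction t with
  | nil => simp [pvRen1, pvCollapse, pvFlat]
  | cons r u ih =>
    have hu : ∀ h : u ≠ [], u.getLast h ≠ [] := by
      intro h
      have := ht (by simp)
      rwa [List.getLast_cons h] at this
    have ihu := ih hu
    by_cases h0 : r = []
    · subst h0
      have hune : u ≠ [] := by
        intro h; subst h
        exact (ht (by simp)) rfl
      constructor
      · intro _ nl hnl
        simp only [pvRen1, if_pos rfl, pvCollapse]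
        exact ihu.1 hune (nl + 1) (by omega)
      · simp only [pvRen1, if_pos rfl, pvCollapse, pvFlat]
        rw [ihu.1 hune 2 (by omega)]
        simp [pvFlat]
    · constructor
      · intro _ nl hnl
        have h2 : min nl 2 = 2 := by omega
        simp only [pvRen1, if_neg h0, pvCollapse, h2]
        rw [ihu.2]
        simp [pvFlat, h0, List.replicate]
      · simp only [pvRen1, if_neg h0, pvCollapse, h0]
        rw [ihu.2]
        simp [pvFlat, h0, List.replicate]

theorem pvRen0_collapse_pos (M : List (List Char)) (hM : ∀ h : M ≠ [], M.getLast h ≠ []) :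
    M ≠ [] → ∀ nl, 1 ≤ nl → pvRen0 nl M = pvFlat (pvCollapse true M) := by
  induction M with
  | nil => simp
  | cons r u ih =>
    have hu : ∀ h : u ≠ [], u.getLast h ≠ [] := by
      intro h
      have := hM (by simp)
      rwa [List.getLast_cons h] at this
    intro _ nl hnl
    by_cases h0 : r = []
    · subst h0
      have hune : u ≠ [] := by
        intro h; subst h; exact (hM (by simp)) rfl
      simp only [pvRen0, if_pos rfl, pvCollapse]
      exact ih hu hune (nl + 1) (by omega)
    · have h1 : min nl 1 = 1 := by omega
      simp only [pvRen0, if_neg h0, pvCollapse, h1]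
      rw [(pvRen1_collapse u hu).2]
      simp [pvFlat, h0, List.replicate]

theorem pvRen0_collapse (M : List (List Char)) (hM : ∀ h : M ≠ [], M.getLast h ≠ []) :
    pvRen0 0 M = pvJfl (pvCollapse false M) := by
  cases M with
  | nil => simp [pvRen0, pvCollapse, pvJfl]
  | cons r u =>
    have hu : ∀ h : u ≠ [], u.getLast h ≠ [] := by
      intro h
      have := hM (by simp)
      rwa [List.getLast_cons h] at this
    by_cases h0 : r = []
    · subst h0
      have hune : u ≠ [] := by
        intro h; subst h; exact (hM (by simp)) rfl
      simp only [pvRen0, if_pos rfl, pvCollapse, pvJfl]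
      rw [pvRen0_collapse_pos u hu hune 1 (by omega)]
      simp
    · simp only [pvRen0, if_neg h0, pvCollapse, h0, pvJfl]
      rw [(pvRen1_collapse u hu).2]
      simp [pvFlat]

theorem pvJfl_eq_join (M : List (List Char)) :
    PySem.Chars.join ['\n'] M = pvJfl M := by
  cases M with
  | nil => simp [PySem.Chars.join, pvJfl, List.intercalate]
  | cons x xs =>
    induction xs generalizing x with
    | nil => simp [PySem.Chars.join, pvJfl, pvFlat, List.intercalate]
    | cons y ys ih =>
      simp only [PySem.Chars.join] at ih ⊢
      rw [pvIntercalate_cons_cons, ih y]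
      simp [pvJfl, pvFlat]

theorem pvRen0_ne_nil (M : List (List Char)) (hM : ∀ h : M ≠ [], M.getLast h ≠ []) :
    M ≠ [] → ∀ nl, pvRen0 nl M ≠ [] := by
  induction M with
  | nil => simp
  | cons r u ih =>
    have hu : ∀ h : u ≠ [], u.getLast h ≠ [] := by
      intro h
      have := hM (by simp)
      rwa [List.getLast_cons h] at this
    intro _ nl
    by_cases h0 : r = []
    · subst h0
      have hune : u ≠ [] := by
        intro h; subst h; exact (hM (by simp)) rfl
      simp only [pvRen0, if_pos rfl]
      exact ih hu hune (nl + 1)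
    · simp only [pvRen0, if_neg h0]
      simp [h0]

-- ===== VERDICT (by name: the statement is the Claim_ definition above) =====
theorem clean_code_whitespace_spec : Claim_equal_clean_code_whitespace := by
  intro code _
  simp only [Spec_clean_code_whitespace, clean_code_whitespace, clean_code_whitespace_alt]
  rw [pvSplitOn_eq]
  set L := pvMySplit code.toList [] with hLdef
  have hnl : ∀ p ∈ L, '\n' ∉ p := pvMySplit_no_nl code.toList [] (by simp)
  have hcode : code.toList = List.intercalate ['\n'] L := by
    rw [pvMySplit_intercalate code.toList []]; simp
  obtain ⟨l0, ts, hL⟩ := List.exists_cons_of_ne_nil (pvMySplit_ne_nil code.toList [])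
  have hB1 : List.foldl pvStepB ([], [], 0) code.toList = pvRunB ([], [], 0) L := by
    rw [hcode, hLdef, hL, pvFoldB_runB]
  set R := L.map PySem.Chars.rstrip with hRdef
  set M := pvPopTrailing R with hMdef
  have hMlast := pvPopTrailing_getLast R
  have hout : (List.foldl pvStepB ([], [], 0) code.toList).1 = pvRen0 0 M := by
    rw [hB1, pvRunB_accR L hnl [] 0, pvAccR_ren0, hMdef, pvRen0_popTrailing]
  have HP : ∀ l ∈ M, (PySem.Chars.strip l = [] ↔ l = []) := by
    intro l hl
    have hmem : l ∈ R := pvPopTrailing_subset R l hl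
    obtain ⟨x, -, rfl⟩ := List.mem_map.mp hmem
    exact pvStrip_rstrip_eq_nil_iff x
  have hA := pvFoldA M [] false HP
  rw [hA, List.nil_append, hout]
  by_cases hM : M = []
  · rw [hM]; simp [pvCollapse, pvRen0]
  · obtain ⟨m, mt, hMc⟩ := List.exists_cons_of_ne_nil hM
    have hNne : pvCollapse false M ≠ [] := by rw [hMc]; exact pvCollapse_ne_nil m mt
    have hOne : pvRen0 0 M ≠ [] := pvRen0_ne_nil M hMlast hM 0
    rw [if_pos hNne, if_pos hOne, pvRen0_collapse M hMlast, pvJfl_eq_join]
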